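-- pv_equiv track=rewrite | github.com/shikharvarshney1983/tambola | ticket.py | chkLstCount
-- ===== SOURCE A (Python) =====
-- def chkLstCount(lstNum):
--     lst=[0,0,0,0,0,0,0,0,0]
--     retLst=[[],[],[],[],[],[],[],[],[]]
--     for nm in lstNum:
--         for i in range(0,71,10):
--             if nm >= i and nm < i+10:
--                 lst[int(i/10)] = lst[int(i/10)] + 1
--                 retLst[int(i/10)].append(nm)
--         if nm >= 80 and nm < 91:
--             lst[8] = lst[8] + 1
--             retLst[8].append(nm)
--     return lst, retLst
-- ===== SOURCE B (Python) =====
-- def chkLstCount(lstNum):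
--     retLst = [[], [], [], [], [], [], [], [], []]
--     for nm in lstNum:
--         if 0 <= nm < 80:
--             retLst[int(nm // 10)].append(nm)
--         elif 80 <= nm < 91:
--             retLst[8].append(nm)
--     lst = [len(b) for b in retLst]
--     return lst, retLst
-- ===== Notes on version B (the rewrite author's own statement) =====
-- stated objective: simpler
-- what changed: Replaces the per-element scan over range(0,71,10) with a direct closed-form column index nm//10 (keeping the 80..90 -> column 8 case), and derives the counts as len(bucket) after the loop instead of maintaining a parallel count list.
import Mathlib
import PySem

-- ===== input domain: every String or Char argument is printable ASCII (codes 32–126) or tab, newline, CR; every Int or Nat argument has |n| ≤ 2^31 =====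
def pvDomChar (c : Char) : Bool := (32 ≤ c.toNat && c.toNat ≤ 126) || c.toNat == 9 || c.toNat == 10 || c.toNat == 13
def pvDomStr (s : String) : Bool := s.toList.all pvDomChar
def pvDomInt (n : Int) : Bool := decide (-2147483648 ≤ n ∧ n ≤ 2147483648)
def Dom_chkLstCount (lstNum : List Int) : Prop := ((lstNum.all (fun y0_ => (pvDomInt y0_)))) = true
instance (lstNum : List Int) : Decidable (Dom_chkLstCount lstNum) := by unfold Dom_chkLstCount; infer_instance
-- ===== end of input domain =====

-- B replaces A's per-element scan over range(0,71,10) with a direct column index nm//10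
-- and derives counts from bucket lengths after the loop (objective: simpler).


-- ===== PORT A =====
-- body of A's outer loop: inner 'for i in range(0,71,10)' scan, then the 80..90 branch;
-- the index int(i/10) is nonnegative here, so '.toNat' on floordiv is exact
def pvAStep (nm : Int) (st : List Int × List (List Int)) : List Int × List (List Int) :=
  let st1 := (PySem.List.pyRange 0 71 10).foldl
    (fun (s : List Int × List (List Int)) i =>
      if nm ≥ i ∧ nm < i + 10 then
        let k := (PySem.Int.floordiv i 10).toNat
        (s.1.set k (s.1.getD k 0 + 1), s.2.set k (s.2.getD k [] ++ [nm]))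
      else s) st
  if nm ≥ 80 ∧ nm < 91 then
    (st1.1.set 8 (st1.1.getD 8 0 + 1), st1.2.set 8 (st1.2.getD 8 [] ++ [nm]))
  else st1

def chkLstCount (lstNum : List Int) : List Int × List (List Int) :=
  lstNum.foldl (fun st nm => pvAStep nm st)
    ([0,0,0,0,0,0,0,0,0], [[],[],[],[],[],[],[],[],[]])

-- ===== PORT B =====
-- body of B's loop: direct bucket index, no count list
def pvBStep (nm : Int) (r : List (List Int)) : List (List Int) :=
  if 0 ≤ nm ∧ nm < 80 then
    let k := (PySem.Int.floordiv nm 10).toNat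
    r.set k (r.getD k [] ++ [nm])
  else if 80 ≤ nm ∧ nm < 91 then
    r.set 8 (r.getD 8 [] ++ [nm])
  else r

def chkLstCount_alt (lstNum : List Int) : List Int × List (List Int) :=
  let ret := lstNum.foldl (fun r nm => pvBStep nm r) [[],[],[],[],[],[],[],[],[]]
  (ret.map (fun b => (b.length : Int)), ret)

-- ===== PRECONDITION & SPEC =====
def Spec_chkLstCount (lstNum : List Int) (out : List Int × List (List Int)) : Prop := out = chkLstCount_alt lstNum
instance (lstNum : List Int) (out : List Int × List (List Int)) : Decidable (Spec_chkLstCount lstNum out) := by unfold Spec_chkLstCount; infer_instance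

-- ===== CLAIM (what is proved, stated in full; the proofs are below) =====
def Claim_equal_chkLstCount : Prop := ∀ (lstNum : List Int), Dom_chkLstCount lstNum → Spec_chkLstCount lstNum (chkLstCount lstNum)

-- ===== LEMMAS AND PROOFS =====

-- one step preserves the invariant "counts = bucket lengths"
lemma pvStep_eq (nm : Int) (R : List (List Int)) (hR : R.length = 9) :
    pvAStep nm (R.map (fun b => (b.length : Int)), R)
    = ((pvBStep nm R).map (fun b => (b.length : Int)), pvBStep nm R) := by
  match R, hR with
  | [r0,r1,r2,r3,r4,r5,r6,r7,r8], _ =>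
  have hrange : PySem.List.pyRange 0 71 10 = [0,10,20,30,40,50,60,70] := by decide
  have hb := PySem.Int.floordiv_mul_add_mod nm 10
  have hb1 : 0 ≤ PySem.Int.mod nm 10 := PySem.Int.mod_nonneg nm (by omega)
  have hb2 : PySem.Int.mod nm 10 < 10 := PySem.Int.mod_lt nm (by omega)
  rcases (show nm < 0 ∨ (0 ≤ nm ∧ nm < 10) ∨ (10 ≤ nm ∧ nm < 20) ∨ (20 ≤ nm ∧ nm < 30) ∨ (30 ≤ nm ∧ nm < 40) ∨ (40 ≤ nm ∧ nm < 50) ∨ (50 ≤ nm ∧ nm < 60) ∨ (60 ≤ nm ∧ nm < 70) ∨ (70 ≤ nm ∧ nm < 80) ∨ (80 ≤ nm ∧ nm < 91) ∨ 91 ≤ nm from by omega) with h | h | h | h | h | h | h | h | h | h | h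
  · -- nm < 0
    have p0 : ¬((0:Int) ≤ nm) := by omega
    have p1 : ¬((10:Int) ≤ nm) := by omega
    have p2 : ¬((20:Int) ≤ nm) := by omega
    have p3 : ¬((30:Int) ≤ nm) := by omega
    have p4 : ¬((40:Int) ≤ nm) := by omega
    have p5 : ¬((50:Int) ≤ nm) := by omega
    have p6 : ¬((60:Int) ≤ nm) := by omega
    have p7 : ¬((70:Int) ≤ nm) := by omega
    have p8 : ¬((80:Int) ≤ nm) := by omega
    have q0 : (nm < (10:Int)) := by omega
    have q1 : (nm < (20:Int)) := by omega
    have q2 : (nm < (30:Int)) := by omega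
    have q3 : (nm < (40:Int)) := by omega
    have q4 : (nm < (50:Int)) := by omega
    have q5 : (nm < (60:Int)) := by omega
    have q6 : (nm < (70:Int)) := by omega
    have q7 : (nm < (80:Int)) := by omega
    have q8 : (nm < (91:Int)) := by omega
    simp [pvAStep, pvBStep, hrange, p0, p1, p2, p3, p4, p5, p6, p7, p8, q0, q1, q2, q3, q4, q5, q6, q7, q8]
  · -- 0 <= nm < 10
    have p0 : ((0:Int) ≤ nm) := by omega
    have p1 : ¬((10:Int) ≤ nm) := by omega
    have p2 : ¬((20:Int) ≤ nm) := by omega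
    have p3 : ¬((30:Int) ≤ nm) := by omega
    have p4 : ¬((40:Int) ≤ nm) := by omega
    have p5 : ¬((50:Int) ≤ nm) := by omega
    have p6 : ¬((60:Int) ≤ nm) := by omega
    have p7 : ¬((70:Int) ≤ nm) := by omega
    have p8 : ¬((80:Int) ≤ nm) := by omega
    have q0 : (nm < (10:Int)) := by omega
    have q1 : (nm < (20:Int)) := by omega
    have q2 : (nm < (30:Int)) := by omega
    have q3 : (nm < (40:Int)) := by omega
    have q4 : (nm < (50:Int)) := by omega
    have q5 : (nm < (60:Int)) := by omega
    have q6 : (nm < (70:Int)) := by omega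
    have q7 : (nm < (80:Int)) := by omega
    have q8 : (nm < (91:Int)) := by omega
    have hf2 : nm / 10 = (0:Int) := by omega
    simp [pvAStep, pvBStep, hrange, p0, p1, p2, p3, p4, p5, p6, p7, p8, q0, q1, q2, q3, q4, q5, q6, q7, q8, hf2]
  · -- 10 <= nm < 20
    have p0 : ((0:Int) ≤ nm) := by omega
    have p1 : ((10:Int) ≤ nm) := by omega
    have p2 : ¬((20:Int) ≤ nm) := by omega
    have p3 : ¬((30:Int) ≤ nm) := by omega
    have p4 : ¬((40:Int) ≤ nm) := by omega
    have p5 : ¬((50:Int) ≤ nm) := by omega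
    have p6 : ¬((60:Int) ≤ nm) := by omega
    have p7 : ¬((70:Int) ≤ nm) := by omega
    have p8 : ¬((80:Int) ≤ nm) := by omega
    have q0 : ¬(nm < (10:Int)) := by omega
    have q1 : (nm < (20:Int)) := by omega
    have q2 : (nm < (30:Int)) := by omega
    have q3 : (nm < (40:Int)) := by omega
    have q4 : (nm < (50:Int)) := by omega
    have q5 : (nm < (60:Int)) := by omega
    have q6 : (nm < (70:Int)) := by omega
    have q7 : (nm < (80:Int)) := by omega
    have q8 : (nm < (91:Int)) := by omega
    have hf2 : nm / 10 = (1:Int) := by omega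
    simp [pvAStep, pvBStep, hrange, p0, p1, p2, p3, p4, p5, p6, p7, p8, q0, q1, q2, q3, q4, q5, q6, q7, q8, hf2]
  · -- 20 <= nm < 30
    have p0 : ((0:Int) ≤ nm) := by omega
    have p1 : ((10:Int) ≤ nm) := by omega
    have p2 : ((20:Int) ≤ nm) := by omega
    have p3 : ¬((30:Int) ≤ nm) := by omega
    have p4 : ¬((40:Int) ≤ nm) := by omega
    have p5 : ¬((50:Int) ≤ nm) := by omega
    have p6 : ¬((60:Int) ≤ nm) := by omega
    have p7 : ¬((70:Int) ≤ nm) := by omega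
    have p8 : ¬((80:Int) ≤ nm) := by omega
    have q0 : ¬(nm < (10:Int)) := by omega
    have q1 : ¬(nm < (20:Int)) := by omega
    have q2 : (nm < (30:Int)) := by omega
    have q3 : (nm < (40:Int)) := by omega
    have q4 : (nm < (50:Int)) := by omega
    have q5 : (nm < (60:Int)) := by omega
    have q6 : (nm < (70:Int)) := by omega
    have q7 : (nm < (80:Int)) := by omega
    have q8 : (nm < (91:Int)) := by omega
    have hf2 : nm / 10 = (2:Int) := by omega
    simp [pvAStep, pvBStep, hrange, p0, p1, p2, p3, p4, p5, p6, p7, p8, q0, q1, q2, q3, q4, q5, q6, q7, q8, hf2]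
  · -- 30 <= nm < 40
    have p0 : ((0:Int) ≤ nm) := by omega
    have p1 : ((10:Int) ≤ nm) := by omega
    have p2 : ((20:Int) ≤ nm) := by omega
    have p3 : ((30:Int) ≤ nm) := by omega
    have p4 : ¬((40:Int) ≤ nm) := by omega
    have p5 : ¬((50:Int) ≤ nm) := by omega
    have p6 : ¬((60:Int) ≤ nm) := by omega
    have p7 : ¬((70:Int) ≤ nm) := by omega
    have p8 : ¬((80:Int) ≤ nm) := by omega
    have q0 : ¬(nm < (10:Int)) := by omega
    have q1 : ¬(nm < (20:Int)) := by omega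
    have q2 : ¬(nm < (30:Int)) := by omega
    have q3 : (nm < (40:Int)) := by omega
    have q4 : (nm < (50:Int)) := by omega
    have q5 : (nm < (60:Int)) := by omega
    have q6 : (nm < (70:Int)) := by omega
    have q7 : (nm < (80:Int)) := by omega
    have q8 : (nm < (91:Int)) := by omega
    have hf2 : nm / 10 = (3:Int) := by omega
    simp [pvAStep, pvBStep, hrange, p0, p1, p2, p3, p4, p5, p6, p7, p8, q0, q1, q2, q3, q4, q5, q6, q7, q8, hf2]
  · -- 40 <= nm < 50
    have p0 : ((0:Int) ≤ nm) := by omega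
    have p1 : ((10:Int) ≤ nm) := by omega
    have p2 : ((20:Int) ≤ nm) := by omega
    have p3 : ((30:Int) ≤ nm) := by omega
    have p4 : ((40:Int) ≤ nm) := by omega
    have p5 : ¬((50:Int) ≤ nm) := by omega
    have p6 : ¬((60:Int) ≤ nm) := by omega
    have p7 : ¬((70:Int) ≤ nm) := by omega
    have p8 : ¬((80:Int) ≤ nm) := by omega
    have q0 : ¬(nm < (10:Int)) := by omega
    have q1 : ¬(nm < (20:Int)) := by omega
    have q2 : ¬(nm < (30:Int)) := by omega
    have q3 : ¬(nm < (40:Int)) := by omega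
    have q4 : (nm < (50:Int)) := by omega
    have q5 : (nm < (60:Int)) := by omega
    have q6 : (nm < (70:Int)) := by omega
    have q7 : (nm < (80:Int)) := by omega
    have q8 : (nm < (91:Int)) := by omega
    have hf2 : nm / 10 = (4:Int) := by omega
    simp [pvAStep, pvBStep, hrange, p0, p1, p2, p3, p4, p5, p6, p7, p8, q0, q1, q2, q3, q4, q5, q6, q7, q8, hf2]
  · -- 50 <= nm < 60
    have p0 : ((0:Int) ≤ nm) := by omega
    have p1 : ((10:Int) ≤ nm) := by omega
    have p2 : ((20:Int) ≤ nm) := by omega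
    have p3 : ((30:Int) ≤ nm) := by omega
    have p4 : ((40:Int) ≤ nm) := by omega
    have p5 : ((50:Int) ≤ nm) := by omega
    have p6 : ¬((60:Int) ≤ nm) := by omega
    have p7 : ¬((70:Int) ≤ nm) := by omega
    have p8 : ¬((80:Int) ≤ nm) := by omega
    have q0 : ¬(nm < (10:Int)) := by omega
    have q1 : ¬(nm < (20:Int)) := by omega
    have q2 : ¬(nm < (30:Int)) := by omega
    have q3 : ¬(nm < (40:Int)) := by omega
    have q4 : ¬(nm < (50:Int)) := by omega
    have q5 : (nm < (60:Int)) := by omega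
    have q6 : (nm < (70:Int)) := by omega
    have q7 : (nm < (80:Int)) := by omega
    have q8 : (nm < (91:Int)) := by omega
    have hf2 : nm / 10 = (5:Int) := by omega
    simp [pvAStep, pvBStep, hrange, p0, p1, p2, p3, p4, p5, p6, p7, p8, q0, q1, q2, q3, q4, q5, q6, q7, q8, hf2]
  · -- 60 <= nm < 70
    have p0 : ((0:Int) ≤ nm) := by omega
    have p1 : ((10:Int) ≤ nm) := by omega
    have p2 : ((20:Int) ≤ nm) := by omega
    have p3 : ((30:Int) ≤ nm) := by omega
    have p4 : ((40:Int) ≤ nm) := by omega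
    have p5 : ((50:Int) ≤ nm) := by omega
    have p6 : ((60:Int) ≤ nm) := by omega
    have p7 : ¬((70:Int) ≤ nm) := by omega
    have p8 : ¬((80:Int) ≤ nm) := by omega
    have q0 : ¬(nm < (10:Int)) := by omega
    have q1 : ¬(nm < (20:Int)) := by omega
    have q2 : ¬(nm < (30:Int)) := by omega
    have q3 : ¬(nm < (40:Int)) := by omega
    have q4 : ¬(nm < (50:Int)) := by omega
    have q5 : ¬(nm < (60:Int)) := by omega
    have q6 : (nm < (70:Int)) := by omega
    have q7 : (nm < (80:Int)) := by omega
    have q8 : (nm < (91:Int)) := by omega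
    have hf2 : nm / 10 = (6:Int) := by omega
    simp [pvAStep, pvBStep, hrange, p0, p1, p2, p3, p4, p5, p6, p7, p8, q0, q1, q2, q3, q4, q5, q6, q7, q8, hf2]
  · -- 70 <= nm < 80
    have p0 : ((0:Int) ≤ nm) := by omega
    have p1 : ((10:Int) ≤ nm) := by omega
    have p2 : ((20:Int) ≤ nm) := by omega
    have p3 : ((30:Int) ≤ nm) := by omega
    have p4 : ((40:Int) ≤ nm) := by omega
    have p5 : ((50:Int) ≤ nm) := by omega
    have p6 : ((60:Int) ≤ nm) := by omega
    have p7 : ((70:Int) ≤ nm) := by omega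
    have p8 : ¬((80:Int) ≤ nm) := by omega
    have q0 : ¬(nm < (10:Int)) := by omega
    have q1 : ¬(nm < (20:Int)) := by omega
    have q2 : ¬(nm < (30:Int)) := by omega
    have q3 : ¬(nm < (40:Int)) := by omega
    have q4 : ¬(nm < (50:Int)) := by omega
    have q5 : ¬(nm < (60:Int)) := by omega
    have q6 : ¬(nm < (70:Int)) := by omega
    have q7 : (nm < (80:Int)) := by omega
    have q8 : (nm < (91:Int)) := by omega
    have hf2 : nm / 10 = (7:Int) := by omega
    simp [pvAStep, pvBStep, hrange, p0, p1, p2, p3, p4, p5, p6, p7, p8, q0, q1, q2, q3, q4, q5, q6, q7, q8, hf2]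
  · -- 80 <= nm < 91
    have p0 : ((0:Int) ≤ nm) := by omega
    have p1 : ((10:Int) ≤ nm) := by omega
    have p2 : ((20:Int) ≤ nm) := by omega
    have p3 : ((30:Int) ≤ nm) := by omega
    have p4 : ((40:Int) ≤ nm) := by omega
    have p5 : ((50:Int) ≤ nm) := by omega
    have p6 : ((60:Int) ≤ nm) := by omega
    have p7 : ((70:Int) ≤ nm) := by omega
    have p8 : ((80:Int) ≤ nm) := by omega
    have q0 : ¬(nm < (10:Int)) := by omega
    have q1 : ¬(nm < (20:Int)) := by omega
    have q2 : ¬(nm < (30:Int)) := by omega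
    have q3 : ¬(nm < (40:Int)) := by omega
    have q4 : ¬(nm < (50:Int)) := by omega
    have q5 : ¬(nm < (60:Int)) := by omega
    have q6 : ¬(nm < (70:Int)) := by omega
    have q7 : ¬(nm < (80:Int)) := by omega
    have q8 : (nm < (91:Int)) := by omega
    simp [pvAStep, pvBStep, hrange, p0, p1, p2, p3, p4, p5, p6, p7, p8, q0, q1, q2, q3, q4, q5, q6, q7, q8]
  · -- 91 <= nm
    have p0 : ((0:Int) ≤ nm) := by omega
    have p1 : ((10:Int) ≤ nm) := by omega
    have p2 : ((20:Int) ≤ nm) := by omega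
    have p3 : ((30:Int) ≤ nm) := by omega
    have p4 : ((40:Int) ≤ nm) := by omega
    have p5 : ((50:Int) ≤ nm) := by omega
    have p6 : ((60:Int) ≤ nm) := by omega
    have p7 : ((70:Int) ≤ nm) := by omega
    have p8 : ((80:Int) ≤ nm) := by omega
    have q0 : ¬(nm < (10:Int)) := by omega
    have q1 : ¬(nm < (20:Int)) := by omega
    have q2 : ¬(nm < (30:Int)) := by omega
    have q3 : ¬(nm < (40:Int)) := by omega
    have q4 : ¬(nm < (50:Int)) := by omega
    have q5 : ¬(nm < (60:Int)) := by omega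
    have q6 : ¬(nm < (70:Int)) := by omega
    have q7 : ¬(nm < (80:Int)) := by omega
    have q8 : ¬(nm < (91:Int)) := by omega
    simp [pvAStep, pvBStep, hrange, p0, p1, p2, p3, p4, p5, p6, p7, p8, q0, q1, q2, q3, q4, q5, q6, q7, q8]

lemma pvBStep_len (nm : Int) (R : List (List Int)) : (pvBStep nm R).length = R.length := by
  simp only [pvBStep]; split_ifs <;> simp

lemma pvInv (l : List Int) : ∀ (R : List (List Int)), R.length = 9 →
    l.foldl (fun st nm => pvAStep nm st) (R.map (fun b => (b.length : Int)), R)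
    = (let R' := l.foldl (fun r nm => pvBStep nm r) R
       (R'.map (fun b => (b.length : Int)), R')) := by
  induction l with
  | nil => intro R hR; rfl
  | cons nm l ih =>
    intro R hR
    simp only [List.foldl_cons]
    rw [pvStep_eq nm R hR]
    exact ih (pvBStep nm R) (by rw [pvBStep_len, hR])

-- ===== VERDICT (by name: the statement is the Claim_ definition above) =====
theorem chkLstCount_spec : Claim_equal_chkLstCount := by
  intro lstNum _
  show chkLstCount lstNum = chkLstCount_alt lstNum
  have h := pvInv lstNum [[],[],[],[],[],[],[],[],[]] (by rfl)
  simpa [chkLstCount, chkLstCount_alt] using h
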